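-- pv_equiv track=rewrite | github.com/nadiabahrami/c_war_practice | level_7/mobile_keystrokes.py | mobile_keyboard
-- ===== SOURCE A (Python) =====
-- def mobile_keyboard(s):
--     v = {3: set(['b', 'e', 'h', 'k', 'n', 'q', 'u', 'x']),
--          4: set(['c', 'f', 'i', 'l', 'o', 'r', 'v', 'y']),
--          5: set(['s', 'z'])}
--     strokes = 0
--     for c in s:
--         if c in v[3]:
--             strokes += 3
--         elif c in v[4]:
--             strokes += 4
--         elif c in v[5]:
--             strokes += 5
--         elif c.isalpha():
--             strokes += 2
--         else:
--             strokes += 1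
--     return strokes
-- ===== SOURCE B (Python) =====
-- GROUPS = ["abc", "def", "ghi", "jkl", "mno", "pqrs", "tuv", "wxyz"]
--
--
-- def mobile_keyboard(s):
--     total = 0
--     for c in s:
--         for g in GROUPS:
--             i = g.find(c)
--             if i != -1:
--                 total += i + 2
--                 break
--         else:
--             total += 2 if c.isalpha() else 1
--     return total
-- ===== Notes on version B (the rewrite author's own statement) =====
-- stated objective: idiomatic
-- what changed: B derives each key cost from the character's position in a keypad layout list of group strings (group.find(c)+2) instead of A's three hard-coded cost-labelled sets tested in sequence.
import Mathlib
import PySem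

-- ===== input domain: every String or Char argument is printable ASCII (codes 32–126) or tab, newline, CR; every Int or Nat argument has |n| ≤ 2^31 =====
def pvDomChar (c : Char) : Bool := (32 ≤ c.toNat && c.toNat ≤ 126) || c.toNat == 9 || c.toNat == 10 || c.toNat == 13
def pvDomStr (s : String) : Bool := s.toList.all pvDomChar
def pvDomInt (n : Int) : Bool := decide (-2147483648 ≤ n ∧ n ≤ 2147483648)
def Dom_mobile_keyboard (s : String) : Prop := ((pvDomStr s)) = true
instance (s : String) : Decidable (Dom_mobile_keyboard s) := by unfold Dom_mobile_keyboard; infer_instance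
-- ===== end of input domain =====

-- B computes each key's cost from the character's position in a keypad layout
-- (group.find(c) + 2) instead of A's three hard-coded cost-labelled sets; objective: idiomatic.

-- ===== PORT A =====
def pv_v3 : PySem.Set Char := PySem.Set.ofList ['b', 'e', 'h', 'k', 'n', 'q', 'u', 'x']
def pv_v4 : PySem.Set Char := PySem.Set.ofList ['c', 'f', 'i', 'l', 'o', 'r', 'v', 'y']
def pv_v5 : PySem.Set Char := PySem.Set.ofList ['s', 'z']

def mobile_keyboard (s : String) : Int :=
  s.toList.foldl (fun strokes c =>
    if PySem.Set.contains pv_v3 c then strokes + 3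
    else if PySem.Set.contains pv_v4 c then strokes + 4
    else if PySem.Set.contains pv_v5 c then strokes + 5
    else if PySem.Chars.isalpha c then strokes + 2
    else strokes + 1) 0

-- ===== PORT B =====
def pvGroups : List String := ["abc", "def", "ghi", "jkl", "mno", "pqrs", "tuv", "wxyz"]

-- the inner 'for g in GROUPS: … break / else' loop of Source B
def pvGroupCost : List String → Char → Option Int
  | [], _ => none
  | g :: gs, c =>
    let i := PySem.Str.find g (String.singleton c)
    if i ≠ -1 then some (i + 2) else pvGroupCost gs c

def mobile_keyboard_alt (s : String) : Int :=
  s.toList.foldl (fun total c =>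
    match pvGroupCost pvGroups c with
    | some k => total + k
    | none => total + (if PySem.Chars.isalpha c then 2 else 1)) 0

-- ===== PRECONDITION & SPEC =====
def Spec_mobile_keyboard (s : String) (out : Int) : Prop := out = mobile_keyboard_alt s
instance (s : String) (out : Int) : Decidable (Spec_mobile_keyboard s out) := by unfold Spec_mobile_keyboard; infer_instance

-- ===== CLAIM (what is proved, stated in full; the proofs are below) =====
def Claim_equal_mobile_keyboard : Prop := ∀ (s : String), Dom_mobile_keyboard s → Spec_mobile_keyboard s (mobile_keyboard s)

-- ===== LEMMAS AND PROOFS =====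

-- per-character cost of A's branch chain
def pvCostA (c : Char) : Int :=
  if PySem.Set.contains pv_v3 c then 3
  else if PySem.Set.contains pv_v4 c then 4
  else if PySem.Set.contains pv_v5 c then 5
  else if PySem.Chars.isalpha c then 2
  else 1

-- per-character cost of B's keypad scan
def pvCostB (c : Char) : Int :=
  match pvGroupCost pvGroups c with
  | some k => k
  | none => if PySem.Chars.isalpha c then 2 else 1

theorem singleton_infix_iff {α : Type} (c : α) (l : List α) : [c] <:+: l ↔ c ∈ l := by
  constructor
  · intro h; exact h.subset (List.mem_singleton_self c)
  · intro h
    obtain ⟨s, t, rfl⟩ := List.append_of_mem h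
    exact ⟨s, t, by simp⟩

theorem groupCost_none (c : Char) (gs : List String)
    (h : ∀ g ∈ gs, c ∉ g.toList) : pvGroupCost gs c = none := by
  induction gs with
  | nil => rfl
  | cons g gs ih =>
    have hf : PySem.Str.find g (String.singleton c) = -1 := by
      rw [PySem.Str.find_eq_neg_one_iff]
      simp only [String.toList_singleton]
      rw [singleton_infix_iff]
      exact h g (List.mem_cons_self ..)
    simp only [pvGroupCost, hf]
    simpa using ih (fun g' hg' => h g' (List.mem_cons_of_mem _ hg'))

theorem cost_eq (c : Char) : pvCostA c = pvCostB c := by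
  by_cases h : c ∈ ['a','b','c','d','e','f','g','h','i','j','k','l','m',
                    'n','o','p','q','r','s','t','u','v','w','x','y','z']
  · fin_cases h <;> decide
  · simp only [List.mem_cons, List.not_mem_nil, or_false, not_or] at h
    obtain ⟨ha, hb, hc, hd, he, hf, hg, hh, hi, hj, hk, hl, hm,
            hn, ho, hp, hq, hr, hs, ht, hu, hv, hw, hx, hy, hz⟩ := h
    have hnone : pvGroupCost pvGroups c = none := by
      apply groupCost_none
      intro g hg'
      fin_cases hg'
      · have e : ("abc" : String).toList = ['a','b','c'] := by decide
        rw [e]; simp [ha, hb, hc]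
      · have e : ("def" : String).toList = ['d','e','f'] := by decide
        rw [e]; simp [hd, he, hf]
      · have e : ("ghi" : String).toList = ['g','h','i'] := by decide
        rw [e]; simp [hg, hh, hi]
      · have e : ("jkl" : String).toList = ['j','k','l'] := by decide
        rw [e]; simp [hj, hk, hl]
      · have e : ("mno" : String).toList = ['m','n','o'] := by decide
        rw [e]; simp [hm, hn, ho]
      · have e : ("pqrs" : String).toList = ['p','q','r','s'] := by decide
        rw [e]; simp [hp, hq, hr, hs]
      · have e : ("tuv" : String).toList = ['t','u','v'] := by decide
        rw [e]; simp [ht, hu, hv]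
      · have e : ("wxyz" : String).toList = ['w','x','y','z'] := by decide
        rw [e]; simp [hw, hx, hy, hz]
    have h3 : c ∉ pv_v3 := by
      simp [pv_v3, PySem.Set.ofList, PySem.Set.add, hb, he, hh, hk, hn, hq, hu, hx]
    have h4 : c ∉ pv_v4 := by
      simp [pv_v4, PySem.Set.ofList, PySem.Set.add, hc, hf, hi, hl, ho, hr, hv, hy]
    have h5 : c ∉ pv_v5 := by
      simp [pv_v5, PySem.Set.ofList, PySem.Set.add, hs, hz]
    simp [pvCostA, pvCostB, hnone, h3, h4, h5]

theorem fold_eq (l : List Char) (acc : Int) :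
    l.foldl (fun strokes c =>
      if PySem.Set.contains pv_v3 c then strokes + 3
      else if PySem.Set.contains pv_v4 c then strokes + 4
      else if PySem.Set.contains pv_v5 c then strokes + 5
      else if PySem.Chars.isalpha c then strokes + 2
      else strokes + 1) acc
  = l.foldl (fun total c =>
      match pvGroupCost pvGroups c with
      | some k => total + k
      | none => total + (if PySem.Chars.isalpha c then 2 else 1)) acc := by
  induction l generalizing acc with
  | nil => rfl
  | cons c l ih =>
    simp only [List.foldl_cons]
    have hA : (if PySem.Set.contains pv_v3 c then acc + 3
        else if PySem.Set.contains pv_v4 c then acc + 4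
        else if PySem.Set.contains pv_v5 c then acc + 5
        else if PySem.Chars.isalpha c then acc + 2
        else acc + 1) = acc + pvCostA c := by
      simp only [pvCostA]; split_ifs <;> rfl
    have hB : (match pvGroupCost pvGroups c with
        | some k => acc + k
        | none => acc + (if PySem.Chars.isalpha c then 2 else 1)) = acc + pvCostB c := by
      simp only [pvCostB]; cases pvGroupCost pvGroups c <;> rfl
    rw [hA, hB, cost_eq, ih]

-- ===== VERDICT (by name: the statement is the Claim_ definition above) =====
theorem mobile_keyboard_spec : Claim_equal_mobile_keyboard := by
  intro s _
  unfold Spec_mobile_keyboard mobile_keyboard mobile_keyboard_alt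
  exact fold_eq s.toList 0
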